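-- pv_equiv track=rewrite | github.com/sumanth-0/100LinesOfPythonCode | wifi_scanner/wifi_scanner.py | parse_iwlist
-- ===== SOURCE A (Python) =====
-- def parse_iwlist(out):
--     rows=[]
--     ssid=bssid=signal=None
--     for l in out.splitlines():
--         l=l.strip()
--         if l.startswith('Cell '):
--             if ssid: rows.append((ssid,bssid,signal))
--             parts=l.split()
--             bssid=parts[4] if len(parts)>=5 else ''
--             ssid=signal=None
--         elif 'ESSID:' in l:
--             ssid=l.split('ESSID:')[1].strip('"')
--         elif 'Signal level=' in l:
--             signal=l.split('Signal level=')[1].split()[0]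
--     if ssid: rows.append((ssid,bssid,signal))
--     return rows
-- ===== SOURCE B (Python) =====
-- def _bssid(cell):
--     parts = cell.split()
--     return parts[4] if len(parts) >= 5 else ''
--
-- def _row(bssid, body):
--     ssid = None
--     sig = None
--     for l in body:
--         if 'ESSID:' in l:
--             ssid = l.split('ESSID:')[1].strip('"')
--         elif 'Signal level=' in l:
--             sig = l.split('Signal level=')[1].split()[0]
--     if ssid:
--         return (ssid, bssid, sig)
--     return None
--
-- def _scan(lines):
--     if not lines:
--         return []
--     head, rest = lines[0], lines[1:]
--     body = []
--     while rest and not rest[0].startswith('Cell '):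
--         body.append(rest[0])
--         rest = rest[1:]
--     row = _row(_bssid(head), body)
--     return ([row] if row is not None else []) + _scan(rest)
--
-- def parse_iwlist(out):
--     lines = [l.strip() for l in out.splitlines()]
--     while lines and not lines[0].startswith('Cell '):
--         lines = lines[1:]
--     return _scan(lines)
-- ===== Notes on version B (the rewrite author's own statement) =====
-- stated objective: alternative
-- what changed: Replaces A's single stateful pass (mutable ssid/bssid/signal flushed on each 'Cell ' line plus a trailing flush) by a group-then-map decomposition: drop lines before the first 'Cell ' line, recursively cut the rest into per-cell segments, and build each segment's row independently.
-- outside the precondition, e.g. on parse_iwlist('ESSID:"a"'): A returns [('a', None, None)], B returns []; on parse_iwlist('Cell a b c d e\nSignal level='): A raises IndexError, B raises IndexError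
import Mathlib
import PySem

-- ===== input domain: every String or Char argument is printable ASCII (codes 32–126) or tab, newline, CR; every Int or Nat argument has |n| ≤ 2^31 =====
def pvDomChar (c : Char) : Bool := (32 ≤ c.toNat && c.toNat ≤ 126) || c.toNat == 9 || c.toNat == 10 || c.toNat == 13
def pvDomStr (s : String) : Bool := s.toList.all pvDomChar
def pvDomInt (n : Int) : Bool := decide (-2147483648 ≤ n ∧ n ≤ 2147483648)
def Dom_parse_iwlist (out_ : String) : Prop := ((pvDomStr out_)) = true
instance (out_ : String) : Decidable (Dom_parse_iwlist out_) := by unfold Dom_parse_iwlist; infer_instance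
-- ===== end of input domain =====

-- B replaces A's single stateful pass by group-then-map over per-cell segments (alternative decomposition, same cost).


-- shared line-level expressions (identical token-for-token in both Pythons)
def pvEssidOf (l : String) : String :=
  PySem.Str.stripChars ((PySem.List.pyGet? ((PySem.Str.split? l "ESSID:").getD []) 1).getD "") "\""
-- the final [0] raises IndexError in Python when the token list is empty; Pre_ excludes that, the .getD "" is unreachable inside Pre_
def pvSignalOf (l : String) : String :=
  (PySem.List.pyGet? (PySem.Str.split₀ ((PySem.List.pyGet? ((PySem.Str.split? l "Signal level=").getD []) 1).getD "")) 0).getD ""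
def pvBssidOf (l : String) : String :=
  let parts := PySem.Str.split₀ l
  if 5 ≤ parts.length then (PySem.List.pyGet? parts 4).getD "" else ""
def pvNotCell (l : String) : Bool := !PySem.Str.startswith l "Cell "

-- ===== PORT A =====
-- 'if ssid: rows.append((ssid,bssid,signal))'; bssid is Option only before the first Cell line —
-- Pre_ guarantees no row is emitted then, so the .getD "" is unreachable inside Pre_
def pvEmit (ssid : Option String) (bssid : Option String) (signal : Option String) :
    List (String × String × Option String) :=
  match ssid with
  | some s => if s = "" then [] else [(s, bssid.getD "", signal)]
  | none => []

def pvStepA (st : List (String × String × Option String) × Option String × Option String × Option String)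
    (l0 : String) :
    List (String × String × Option String) × Option String × Option String × Option String :=
  let l := PySem.Str.strip l0
  if PySem.Str.startswith l "Cell " then
    (st.1 ++ pvEmit st.2.1 st.2.2.1 st.2.2.2, none, some (pvBssidOf l), none)
  else if PySem.Str.isIn "ESSID:" l then
    (st.1, some (pvEssidOf l), st.2.2.1, st.2.2.2)
  else if PySem.Str.isIn "Signal level=" l then
    (st.1, st.2.1, st.2.2.1, some (pvSignalOf l))
  else st

def parse_iwlist (out_ : String) : List (String × String × Option String) :=
  let fin := (PySem.Str.splitlines out_).foldl pvStepA ([], none, none, none)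
  fin.1 ++ pvEmit fin.2.1 fin.2.2.1 fin.2.2.2

-- ===== PORT B =====
def pvBodyStep (st : Option String × Option String) (l : String) : Option String × Option String :=
  if PySem.Str.isIn "ESSID:" l then (some (pvEssidOf l), st.2)
  else if PySem.Str.isIn "Signal level=" l then (st.1, some (pvSignalOf l))
  else st

def pvRowB (bssid : String) (body : List String) : Option (String × String × Option String) :=
  let p := body.foldl pvBodyStep (none, none)
  match p.1 with
  | some s => if s = "" then none else some (s, bssid, p.2)
  | none => none

def pvScanB : List String → List (String × String × Option String)
  | [] => []
  | h :: rest =>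
    (pvRowB (pvBssidOf h) (rest.takeWhile pvNotCell)).toList ++ pvScanB (rest.dropWhile pvNotCell)
termination_by ls => ls.length
decreasing_by
  have := List.length_dropWhile_le (p := pvNotCell) (l := rest)
  simp; omega

def parse_iwlist_alt (out_ : String) : List (String × String × Option String) :=
  pvScanB (((PySem.Str.splitlines out_).map PySem.Str.strip).dropWhile pvNotCell)

-- ===== PRECONDITION & SPEC =====
-- Pre_ excludes (1) inputs with an 'ESSID:' line before the first 'Cell ' line, where A can emit a row whose
-- bssid slot is Python None — not a String of the declared type; and (2) inputs with a line whose text after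
-- 'Signal level=' holds no whitespace-separated token, on which A raises IndexError.
def Pre_parse_iwlist (out_ : String) : Prop :=
  (∀ l ∈ (((PySem.Str.splitlines out_).map PySem.Str.strip).takeWhile pvNotCell),
     PySem.Str.isIn "ESSID:" l = false) ∧
  (∀ l ∈ ((PySem.Str.splitlines out_).map PySem.Str.strip),
     pvNotCell l = true → PySem.Str.isIn "ESSID:" l = false → PySem.Str.isIn "Signal level=" l = true →
     PySem.Str.split₀ ((PySem.List.pyGet? ((PySem.Str.split? l "Signal level=").getD []) 1).getD "") ≠ [])
instance (out_ : String) : Decidable (Pre_parse_iwlist out_) := by unfold Pre_parse_iwlist; infer_instance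

def pvWitness_parse_iwlist : String :=
  "Cell 01 - Address: AA:BB\n  ESSID:\"net\"\n  Signal level=-40 dBm"

def Spec_parse_iwlist (out_ : String) (out : List (String × String × Option String)) : Prop :=
  out = parse_iwlist_alt out_
instance (out_ : String) (out : List (String × String × Option String)) : Decidable (Spec_parse_iwlist out_ out) := by
  unfold Spec_parse_iwlist; infer_instance

-- ===== CLAIM (what is proved, stated in full; the proofs are below) =====
def Claim_equal_parse_iwlist : Prop :=
  ∀ (out_ : String), Dom_parse_iwlist out_ → Pre_parse_iwlist out_ →
    Spec_parse_iwlist out_ (parse_iwlist out_)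

-- ===== LEMMAS AND PROOFS =====

-- A's step on an already-stripped line (strip is applied once up front instead)
def pvStepC (st : List (String × String × Option String) × Option String × Option String × Option String)
    (l : String) :
    List (String × String × Option String) × Option String × Option String × Option String :=
  if PySem.Str.startswith l "Cell " then
    (st.1 ++ pvEmit st.2.1 st.2.2.1 st.2.2.2, none, some (pvBssidOf l), none)
  else if PySem.Str.isIn "ESSID:" l then
    (st.1, some (pvEssidOf l), st.2.2.1, st.2.2.2)
  else if PySem.Str.isIn "Signal level=" l then
    (st.1, st.2.1, st.2.2.1, some (pvSignalOf l))
  else st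

theorem foldA_eq (ls : List String) (st : List (String × String × Option String) × Option String × Option String × Option String) :
    ls.foldl pvStepA st = (ls.map PySem.Str.strip).foldl pvStepC st := by
  rw [List.foldl_map]
  rfl

theorem rowB_toList (b : String) (body : List String) :
    (pvRowB b body).toList
      = pvEmit (body.foldl pvBodyStep (none, none)).1 (some b) (body.foldl pvBodyStep (none, none)).2 := by
  unfold pvRowB pvEmit
  rcases body.foldl pvBodyStep (none, none) with ⟨ss, sg⟩
  cases ss with
  | none => rfl
  | some s => by_cases hs : s = "" <;> simp [hs]

theorem stepC_notCell (rows : List (String × String × Option String)) (ss bb sg : Option String)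
    (l : String) (hc : PySem.Str.startswith l "Cell " = false) :
    pvStepC (rows, ss, bb, sg) l = (rows, (pvBodyStep (ss, sg) l).1, bb, (pvBodyStep (ss, sg) l).2) := by
  unfold pvStepC pvBodyStep
  rw [hc]
  simp only [Bool.false_eq_true, if_false]
  split
  · rfl
  · split <;> rfl

theorem segLemma (ls : List String) (rows : List (String × String × Option String))
    (ss : Option String) (b : String) (sg : Option String) :
    (ls.foldl pvStepC (rows, ss, some b, sg)).1
        ++ pvEmit (ls.foldl pvStepC (rows, ss, some b, sg)).2.1
                  (ls.foldl pvStepC (rows, ss, some b, sg)).2.2.1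
                  (ls.foldl pvStepC (rows, ss, some b, sg)).2.2.2
      = rows
        ++ pvEmit ((ls.takeWhile pvNotCell).foldl pvBodyStep (ss, sg)).1 (some b)
                  ((ls.takeWhile pvNotCell).foldl pvBodyStep (ss, sg)).2
        ++ pvScanB (ls.dropWhile pvNotCell) := by
  induction ls generalizing rows ss b sg with
  | nil => simp [pvScanB]
  | cons h t ih =>
    by_cases hc : pvNotCell h = true
    · have hsw : PySem.Str.startswith h "Cell " = false := by
        unfold pvNotCell at hc; simpa using hc
      rw [List.takeWhile_cons_of_pos hc, List.dropWhile_cons_of_pos hc]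
      simp only [List.foldl_cons, stepC_notCell rows ss (some b) sg h hsw]
      exact ih rows (pvBodyStep (ss, sg) h).1 b (pvBodyStep (ss, sg) h).2
    · have hc' : pvNotCell h = false := eq_false_of_ne_true hc
      have hsw : PySem.Str.startswith h "Cell " = true := by
        unfold pvNotCell at hc'; simpa using hc'
      rw [List.takeWhile_cons_of_neg (by simp [hc']), List.dropWhile_cons_of_neg (by simp [hc'])]
      have hstep : pvStepC (rows, ss, some b, sg) h
          = (rows ++ pvEmit ss (some b) sg, none, some (pvBssidOf h), none) := by
        unfold pvStepC; rw [hsw]; rfl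
      simp only [List.foldl_cons, hstep]
      rw [ih (rows ++ pvEmit ss (some b) sg) none (pvBssidOf h) none]
      rw [pvScanB, rowB_toList]
      simp [List.append_assoc]

theorem mainLemma (L : List String) (sg : Option String)
    (hE : ∀ l ∈ L.takeWhile pvNotCell, PySem.Str.isIn "ESSID:" l = false) :
    (L.foldl pvStepC ([], none, none, sg)).1
        ++ pvEmit (L.foldl pvStepC ([], none, none, sg)).2.1
                  (L.foldl pvStepC ([], none, none, sg)).2.2.1
                  (L.foldl pvStepC ([], none, none, sg)).2.2.2
      = pvScanB (L.dropWhile pvNotCell) := by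
  induction L generalizing sg with
  | nil => simp [pvScanB, pvEmit]
  | cons h t ih =>
    by_cases hc : pvNotCell h = true
    · have hsw : PySem.Str.startswith h "Cell " = false := by
        unfold pvNotCell at hc; simpa using hc
      have hEh : PySem.Str.isIn "ESSID:" h = false := by
        apply hE; rw [List.takeWhile_cons_of_pos hc]; exact List.mem_cons_self ..
      have hE' : ∀ l ∈ t.takeWhile pvNotCell, PySem.Str.isIn "ESSID:" l = false := by
        intro l hl; apply hE; rw [List.takeWhile_cons_of_pos hc]; exact List.mem_cons_of_mem _ hl
      rw [List.dropWhile_cons_of_pos hc]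
      simp only [List.foldl_cons, stepC_notCell [] none none sg h hsw]
      have hb : pvBodyStep (none, sg) h
          = (none, if PySem.Str.isIn "Signal level=" h then some (pvSignalOf h) else sg) := by
        unfold pvBodyStep
        rw [hEh]
        simp only [Bool.false_eq_true, if_false]
        split <;> rfl
      rw [hb]
      exact ih _ hE'
    · have hc' : pvNotCell h = false := eq_false_of_ne_true hc
      have hsw : PySem.Str.startswith h "Cell " = true := by
        unfold pvNotCell at hc'; simpa using hc'
      have hstep : pvStepC ([], none, none, sg) h
          = ([], none, some (pvBssidOf h), none) := by
        unfold pvStepC; rw [hsw]; rfl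
      rw [List.dropWhile_cons_of_neg (by simp [hc'])]
      simp only [List.foldl_cons, hstep]
      rw [segLemma t [] none (pvBssidOf h) none]
      rw [pvScanB, rowB_toList]
      simp

-- ===== VERDICT (by name: the statement is the Claim_ definition above) =====
theorem parse_iwlist_spec : Claim_equal_parse_iwlist := by
  intro out_ _hdom hpre
  unfold Spec_parse_iwlist parse_iwlist parse_iwlist_alt
  simp only [foldA_eq]
  exact mainLemma ((PySem.Str.splitlines out_).map PySem.Str.strip) none hpre.1
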